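-- pv_equiv track=rewrite | github.com/casey2346/enhanced-intellichat | utils/enhanced_understanding.py | _extract_implicit_topics
-- ===== SOURCE A (Python) =====
-- def _extract_implicit_topics(text):
--     """Extract implicit topics"""
--     # Infer possible topics even without explicit keywords
--     topics = []
--     text_lower = text.lower()
--
--     # Context-based inference
--     if any(word in text_lower for word in ['write', 'code', 'program', 'function', 'algorithm']):
--         topics.append('programming')
--
--     if any(word in text_lower for word in ['calculate', 'number', 'math', 'compute', 'solve']):
--         topics.append('mathematics')
--
--     if any(word in text_lower for word in ['learn', 'teach', 'understand', 'study', 'explain']):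
--         topics.append('education')
--
--     if any(word in text_lower for word in ['sort', 'order', 'arrange', 'organize']):
--         topics.append('sorting')
--
--     if any(word in text_lower for word in ['business', 'strategy', 'market', 'analysis']):
--         topics.append('business')
--
--     return topics
-- ===== SOURCE B (Python) =====
-- _KEYWORD_TO_TOPIC = [
--     ('write', 'programming'), ('code', 'programming'), ('program', 'programming'),
--     ('function', 'programming'), ('algorithm', 'programming'),
--     ('calculate', 'mathematics'), ('number', 'mathematics'), ('math', 'mathematics'),
--     ('compute', 'mathematics'), ('solve', 'mathematics'),
--     ('learn', 'education'), ('teach', 'education'), ('understand', 'education'),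
--     ('study', 'education'), ('explain', 'education'),
--     ('sort', 'sorting'), ('order', 'sorting'), ('arrange', 'sorting'), ('organize', 'sorting'),
--     ('business', 'business'), ('strategy', 'business'), ('market', 'business'), ('analysis', 'business'),
-- ]
-- _TOPIC_ORDER = ['programming', 'mathematics', 'education', 'sorting', 'business']
--
-- def _extract_implicit_topics(text):
--     """Single left-to-right scan of the text: at each position, match any keyword
--     starting there (multi-pattern scan), collecting its topic into a set; then
--     emit the matched topics in canonical order."""
--     t = text.lower()
--     found = set()
--     for i in range(len(t)):
--         for kw, topic in _KEYWORD_TO_TOPIC: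
--             if topic not in found and t.startswith(kw, i):
--                 found.add(topic)
--     return [tp for tp in _TOPIC_ORDER if tp in found]
-- ===== Notes on version B (the rewrite author's own statement) =====
-- stated objective: alternative
-- what changed: Replaced five independent keyword-driven substring searches with a single left-to-right position scan of the text that matches all 23 keywords at each position into a set of topics, then emits matched topics in canonical order.
import Mathlib
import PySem

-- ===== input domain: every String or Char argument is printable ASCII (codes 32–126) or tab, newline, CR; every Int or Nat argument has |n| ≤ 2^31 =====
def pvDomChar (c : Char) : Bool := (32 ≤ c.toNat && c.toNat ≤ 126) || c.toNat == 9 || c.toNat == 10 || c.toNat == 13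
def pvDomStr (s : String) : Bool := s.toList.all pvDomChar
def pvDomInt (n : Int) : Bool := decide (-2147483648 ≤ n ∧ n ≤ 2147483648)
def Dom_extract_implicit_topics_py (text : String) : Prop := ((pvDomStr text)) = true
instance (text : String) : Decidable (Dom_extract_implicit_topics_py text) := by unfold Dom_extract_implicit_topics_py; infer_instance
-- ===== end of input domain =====

-- B replaces A's five keyword-driven substring searches by one left-to-right position scan
-- matching all keywords at each position into a set of topics (alternative algorithm).

-- ===== PORT A =====
def extract_implicit_topics_py (text : String) : List String :=
  let text_lower := PySem.Str.lower text
  let topics : List String := []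
  let topics := if ["write", "code", "program", "function", "algorithm"].any
      (fun word => PySem.Str.isIn word text_lower) then topics ++ ["programming"] else topics
  let topics := if ["calculate", "number", "math", "compute", "solve"].any
      (fun word => PySem.Str.isIn word text_lower) then topics ++ ["mathematics"] else topics
  let topics := if ["learn", "teach", "understand", "study", "explain"].any
      (fun word => PySem.Str.isIn word text_lower) then topics ++ ["education"] else topics
  let topics := if ["sort", "order", "arrange", "organize"].any
      (fun word => PySem.Str.isIn word text_lower) then topics ++ ["sorting"] else topics
  let topics := if ["business", "strategy", "market", "analysis"].any
      (fun word => PySem.Str.isIn word text_lower) then topics ++ ["business"] else topics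
  topics

-- ===== PORT B =====
def kwTopicPairs : List (String × String) :=
  [("write", "programming"), ("code", "programming"), ("program", "programming"),
   ("function", "programming"), ("algorithm", "programming"),
   ("calculate", "mathematics"), ("number", "mathematics"), ("math", "mathematics"),
   ("compute", "mathematics"), ("solve", "mathematics"),
   ("learn", "education"), ("teach", "education"), ("understand", "education"),
   ("study", "education"), ("explain", "education"),
   ("sort", "sorting"), ("order", "sorting"), ("arrange", "sorting"), ("organize", "sorting"),
   ("business", "business"), ("strategy", "business"), ("market", "business"), ("analysis", "business")]

def topicOrder : List String := ["programming", "mathematics", "education", "sorting", "business"]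

-- t.startswith(kw, i) with 0 ≤ i is exactly PySem.Chars.startswith on (toList.drop i.toNat)
def extract_implicit_topics_py_alt (text : String) : List String :=
  let t := PySem.Str.lower text
  let found : PySem.Set String :=
    (PySem.List.pyRange 0 (PySem.Str.len t) 1).foldl
      (fun fd i =>
        kwTopicPairs.foldl
          (fun fd2 p =>
            if ¬ PySem.Set.contains fd2 p.2 ∧
                PySem.Chars.startswith (t.toList.drop i.toNat) p.1.toList then
              PySem.Set.add fd2 p.2
            else fd2) fd)
      PySem.Set.empty
  topicOrder.filter (fun tp => PySem.Set.contains found tp)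

-- ===== PRECONDITION & SPEC =====
def Spec_extract_implicit_topics_py (text : String) (out : List String) : Prop := out = extract_implicit_topics_py_alt text
instance (text : String) (out : List String) : Decidable (Spec_extract_implicit_topics_py text out) := by unfold Spec_extract_implicit_topics_py; infer_instance

-- ===== CLAIM (what is proved, stated in full; the proofs are below) =====
def Claim_equal_extract_implicit_topics_py : Prop := ∀ (text : String), Dom_extract_implicit_topics_py text → Spec_extract_implicit_topics_py text (extract_implicit_topics_py text)

-- ===== LEMMAS AND PROOFS =====

-- membership in the inner fold over the keyword→topic pairs
theorem innerFold_mem (ps : List (String × String)) (m : String × String → Bool)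
    (fd : PySem.Set String) (x : String) :
    (x ∈ ps.foldl (fun fd2 p =>
        if ¬ PySem.Set.contains fd2 p.2 ∧ m p then PySem.Set.add fd2 p.2 else fd2) fd) ↔
    x ∈ fd ∨ ∃ p ∈ ps, p.2 = x ∧ m p = true := by
  induction ps generalizing fd with
  | nil => simp
  | cons p ps ih =>
    simp only [List.foldl_cons, List.mem_cons]
    split_ifs with h
    · rw [ih]
      simp only [PySem.Set.mem_add]
      constructor
      · rintro (((hx | hx) | hx))
        · exact Or.inl hx
        · exact Or.inr ⟨p, Or.inl rfl, hx.symm, h.2⟩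
        · obtain ⟨q, hq, hqx⟩ := hx; exact Or.inr ⟨q, Or.inr hq, hqx⟩
      · rintro (hx | ⟨q, (rfl | hq), hqx⟩)
        · exact Or.inl (Or.inl hx)
        · exact Or.inl (Or.inr hqx.1.symm)
        · exact Or.inr ⟨q, hq, hqx⟩
    · rw [ih]
      constructor
      · rintro (hx | ⟨q, hq, hqx⟩)
        · exact Or.inl hx
        · exact Or.inr ⟨q, Or.inr hq, hqx⟩
      · rintro (hx | ⟨q, (rfl | hq), hqx⟩)
        · exact Or.inl hx
        · by_cases hc : PySem.Set.contains fd q.2 = true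
          · exact Or.inl (hqx.1 ▸ (PySem.Set.contains_iff fd q.2).mp hc)
          · exact absurd ⟨by simpa using hc, by simpa using hqx.2⟩ h
        · exact Or.inr ⟨q, hq, hqx⟩

-- membership in the outer fold over the scan positions
theorem outerFold_mem (tl : List Char) (l : List Int) (fd : PySem.Set String) (x : String) :
    (x ∈ l.foldl (fun fd i =>
        kwTopicPairs.foldl (fun fd2 p =>
          if ¬ PySem.Set.contains fd2 p.2 ∧
              PySem.Chars.startswith (tl.drop i.toNat) p.1.toList then
            PySem.Set.add fd2 p.2 else fd2) fd) fd) ↔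
    x ∈ fd ∨ ∃ i ∈ l, ∃ p ∈ kwTopicPairs, p.2 = x ∧
      PySem.Chars.startswith (tl.drop i.toNat) p.1.toList = true := by
  induction l generalizing fd with
  | nil => simp
  | cons i l ih =>
    simp only [List.foldl_cons, List.mem_cons]
    rw [ih, innerFold_mem kwTopicPairs
      (fun p => PySem.Chars.startswith (tl.drop i.toNat) p.1.toList)]
    constructor
    · rintro ((hx | ⟨q, hq, hqx⟩) | ⟨j, hj, hJ⟩)
      · exact Or.inl hx
      · exact Or.inr ⟨i, Or.inl rfl, q, hq, hqx⟩
      · exact Or.inr ⟨j, Or.inr hj, hJ⟩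
    · rintro (hx | ⟨j, (rfl | hj), hJ⟩)
      · exact Or.inl (Or.inl hx)
      · exact Or.inl (Or.inr hJ)
      · exact Or.inr ⟨j, hj, hJ⟩

-- one keyword: some scan position matches ↔ the keyword is a substring
theorem exists_pos_startswith_iff (tl : List Char) (kw : List Char) (hkw : kw ≠ []) :
    (∃ i ∈ PySem.List.pyRange 0 (tl.length : Int) 1,
        PySem.Chars.startswith (tl.drop i.toNat) kw = true) ↔
    PySem.Chars.isIn kw tl = true := by
  rw [← PySem.Chars.exists_prefix_drop_iff_isIn]
  constructor
  · rintro ⟨i, hi, hs⟩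
    exact ⟨i.toNat, (PySem.Chars.startswith_iff _ _).mp hs⟩
  · rintro ⟨j, hj⟩
    by_cases hjl : j < tl.length
    · refine ⟨(j : Int), ?_, (PySem.Chars.startswith_iff _ _).mpr (by simpa using hj)⟩
      rw [PySem.List.mem_pyRange_one]
      omega
    · exfalso
      rw [List.drop_eq_nil_of_le (by omega)] at hj
      exact hkw (List.prefix_nil.mp hj)

-- proof-side name for B's scan result (definitionally the fold inside the port)
def pvFound (t : String) : PySem.Set String :=
  (PySem.List.pyRange 0 (PySem.Str.len t) 1).foldl
    (fun fd i =>
      kwTopicPairs.foldl (fun fd2 p =>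
        if ¬ PySem.Set.contains fd2 p.2 ∧
            PySem.Chars.startswith (t.toList.drop i.toNat) p.1.toList then
          PySem.Set.add fd2 p.2 else fd2) fd) PySem.Set.empty

-- the scan's set contains a topic ↔ some pair with that topic has its keyword as a substring
theorem found_contains_iff (t : String) (x : String) :
    PySem.Set.contains (pvFound t) x = true ↔
    ∃ p ∈ kwTopicPairs, p.2 = x ∧ PySem.Chars.isIn p.1.toList t.toList = true := by
  have hlen : (PySem.Str.len t : Int) = ((t.toList.length : Nat) : Int) := by
    simp [PySem.Str.len_eq]
  unfold pvFound
  rw [PySem.Set.contains_iff, hlen, outerFold_mem]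
  constructor
  · rintro (hx | ⟨i, hi, q, hq, hq2, hs⟩)
    · simp [PySem.Set.empty] at hx
    · refine ⟨q, hq, hq2, ?_⟩
      have hne : q.1.toList ≠ [] := by fin_cases hq <;> simp
      exact (exists_pos_startswith_iff t.toList q.1.toList hne).mp ⟨i, hi, hs⟩
  · rintro ⟨q, hq, hq2, hin⟩
    have hne : q.1.toList ≠ [] := by fin_cases hq <;> simp
    obtain ⟨i, hi, hs⟩ := (exists_pos_startswith_iff t.toList q.1.toList hne).mpr hin
    exact Or.inr ⟨i, hi, q, hq, hq2, hs⟩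

-- one topic: the scan set's verdict equals A's any-over-keywords test
theorem found_topic_eq (t : String) (tp : String) (G : List String)
    (h : ∀ x : String,
      (∃ p ∈ kwTopicPairs, p.2 = tp ∧ PySem.Chars.isIn p.1.toList x.toList = true) ↔
      G.any (fun w => PySem.Str.isIn w x) = true) :
    PySem.Set.contains (pvFound t) tp = (G.any (fun w => PySem.Str.isIn w t)) := by
  rw [Bool.eq_iff_iff, found_contains_iff]
  exact h t

-- ===== VERDICT (by name: the statement is the Claim_ definition above) =====
theorem extract_implicit_topics_py_spec : Claim_equal_extract_implicit_topics_py := by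
  intro text _
  unfold Spec_extract_implicit_topics_py
  simp only [extract_implicit_topics_py, extract_implicit_topics_py_alt]
  rw [show ∀ t, (PySem.List.pyRange 0 (PySem.Str.len t) 1).foldl
      (fun fd i =>
        kwTopicPairs.foldl (fun fd2 p =>
          if ¬ PySem.Set.contains fd2 p.2 ∧
              PySem.Chars.startswith (t.toList.drop i.toNat) p.1.toList then
            PySem.Set.add fd2 p.2 else fd2) fd) PySem.Set.empty = pvFound t
    from fun _ => rfl]
  set t := PySem.Str.lower text with ht
  have f1 := found_topic_eq t "programming" ["write", "code", "program", "function", "algorithm"]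
    (by intro x; simp [kwTopicPairs]; try tauto)
  have f2 := found_topic_eq t "mathematics" ["calculate", "number", "math", "compute", "solve"]
    (by intro x; simp [kwTopicPairs]; try tauto)
  have f3 := found_topic_eq t "education" ["learn", "teach", "understand", "study", "explain"]
    (by intro x; simp [kwTopicPairs]; try tauto)
  have f4 := found_topic_eq t "sorting" ["sort", "order", "arrange", "organize"]
    (by intro x; simp [kwTopicPairs]; try tauto)
  have f5 := found_topic_eq t "business" ["business", "strategy", "market", "analysis"]
    (by intro x; simp [kwTopicPairs]; try tauto)
  simp only [topicOrder, List.filter, f1, f2, f3, f4, f5]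
  cases h1 : (["write", "code", "program", "function", "algorithm"].any
      (fun w => PySem.Str.isIn w t)) <;>
  cases h2 : (["calculate", "number", "math", "compute", "solve"].any
      (fun w => PySem.Str.isIn w t)) <;>
  cases h3 : (["learn", "teach", "understand", "study", "explain"].any
      (fun w => PySem.Str.isIn w t)) <;>
  cases h4 : (["sort", "order", "arrange", "organize"].any
      (fun w => PySem.Str.isIn w t)) <;>
  cases h5 : (["business", "strategy", "market", "analysis"].any
      (fun w => PySem.Str.isIn w t)) <;>
  simp
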